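-- pv_equiv track=rewrite | github.com/bartlomiejwo/intranet | intranet_project/intranet_project/conference_rooms/views.py | get_adjusted_rooms_data
-- ===== SOURCE A (Python) =====
-- def get_adjusted_rooms_data(conference_rooms_data, desired_rooms_number):
--     indexes_to_remove = []
--
--     for i in range(len(conference_rooms_data)-1, -1, -1):
--         if len(conference_rooms_data) - len(indexes_to_remove) <= desired_rooms_number:
--             break
--
--         if len(conference_rooms_data[i]['meetings']) == 0:
--             indexes_to_remove.append(i)
--
--     return [room_data for i, room_data in enumerate(conference_rooms_data) if i not in indexes_to_remove]
-- ===== SOURCE B (Python) =====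
-- def get_adjusted_rooms_data(conference_rooms_data, desired_rooms_number):
--     budget = len(conference_rooms_data) - desired_rooms_number
--     kept = []
--     for room in reversed(conference_rooms_data):
--         if budget > 0 and len(room['meetings']) == 0:
--             budget -= 1
--         else:
--             kept.append(room)
--     kept.reverse()
--     return kept
-- ===== Notes on version B (the rewrite author's own statement) =====
-- stated objective: simpler
-- what changed: A collects indices of empty rooms in a backward loop and then filters the list with an 'i not in indexes_to_remove' membership scan; B makes one backward pass over the rooms maintaining only an integer budget = len - desired, skipping an empty room while budget > 0, and reverses the kept list.
-- outside the precondition, e.g. on get_adjusted_rooms_data([{}, {'meetings': []}], 1): A returns [{}], B returns [{}]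
import Mathlib
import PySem

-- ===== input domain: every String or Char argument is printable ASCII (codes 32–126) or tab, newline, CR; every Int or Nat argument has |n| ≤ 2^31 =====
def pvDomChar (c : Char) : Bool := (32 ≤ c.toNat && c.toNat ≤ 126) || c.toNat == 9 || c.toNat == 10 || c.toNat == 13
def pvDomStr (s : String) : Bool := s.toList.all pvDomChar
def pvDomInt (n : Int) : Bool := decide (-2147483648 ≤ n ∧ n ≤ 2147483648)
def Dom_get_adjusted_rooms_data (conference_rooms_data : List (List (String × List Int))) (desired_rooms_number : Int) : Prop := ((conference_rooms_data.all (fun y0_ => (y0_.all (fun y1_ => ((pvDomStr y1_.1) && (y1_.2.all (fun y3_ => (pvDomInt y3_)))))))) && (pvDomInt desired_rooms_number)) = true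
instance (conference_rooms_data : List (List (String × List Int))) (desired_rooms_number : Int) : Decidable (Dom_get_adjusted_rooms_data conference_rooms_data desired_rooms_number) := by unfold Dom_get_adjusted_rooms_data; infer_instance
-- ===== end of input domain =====

-- B replaces A's two passes (backward index-collection loop + filtering comprehension with a
-- list-membership scan) by one backward pass over the rooms that maintains only an integer budget;
-- objective: simpler.

-- room['meetings'] lookup (first match in the association list; none = KeyError, excluded by Pre_)
def pvMeet (room : List (String × List Int)) : List Int := (room.lookup "meetings").getD []

-- ===== PORT A =====
-- the backward index-collection loop of A (break returns acc)
def pvALoop (data : List (List (String × List Int))) (d : Int) : List Int → List Int → List Int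
  | [], acc => acc
  | i :: rest, acc =>
    if (data.length : Int) - (acc.length : Int) ≤ d then acc
    else if (pvMeet ((PySem.List.pyGet? data i).getD [])).length = 0 then
      pvALoop data d rest (acc ++ [i])
    else pvALoop data d rest acc

def get_adjusted_rooms_data (conference_rooms_data : List (List (String × List Int))) (desired_rooms_number : Int) : List (List (String × List Int)) :=
  let indexes_to_remove := pvALoop conference_rooms_data desired_rooms_number (PySem.List.pyRange ((conference_rooms_data.length : Int) - 1) (-1) (-1)) []
  ((PySem.List.enumerate conference_rooms_data 0).filter (fun p => !(indexes_to_remove.contains p.1))).map (·.2)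

-- ===== PORT B =====
-- single backward pass: skip an empty room while budget > 0, else keep it
def pvBLoop : Int → List (List (String × List Int)) → List (List (String × List Int)) → List (List (String × List Int))
  | _, kept, [] => kept
  | budget, kept, room :: rest =>
    if 0 < budget ∧ (pvMeet room).length = 0 then pvBLoop (budget - 1) kept rest
    else pvBLoop budget (kept ++ [room]) rest

def get_adjusted_rooms_data_alt (conference_rooms_data : List (List (String × List Int))) (desired_rooms_number : Int) : List (List (String × List Int)) :=
  (pvBLoop ((conference_rooms_data.length : Int) - desired_rooms_number) [] conference_rooms_data.reverse).reverse

-- ===== PRECONDITION & SPEC =====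
-- Python A raises KeyError when its backward loop reaches a room without a 'meetings' key.
-- Pre_ is slightly wider than necessary only in that it is closed-form: it excludes every input
-- with a missing 'meetings' key (unless desired ≥ len, where the loop breaks at once), including
-- the rare inputs where the missing key lies past the loop's stopping point and A still returns.
def Pre_get_adjusted_rooms_data (conference_rooms_data : List (List (String × List Int))) (desired_rooms_number : Int) : Prop :=
  (conference_rooms_data.length : Int) ≤ desired_rooms_number ∨
    ∀ room ∈ conference_rooms_data, (room.lookup "meetings").isSome = true
instance (conference_rooms_data : List (List (String × List Int))) (desired_rooms_number : Int) : Decidable (Pre_get_adjusted_rooms_data conference_rooms_data desired_rooms_number) := by unfold Pre_get_adjusted_rooms_data; infer_instance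

def pvWitness_get_adjusted_rooms_data : (List (List (String × List Int))) × Int :=
  ([[("meetings", [1, 2])], [("meetings", [])], [("meetings", [])]], 2)

def Spec_get_adjusted_rooms_data (conference_rooms_data : List (List (String × List Int))) (desired_rooms_number : Int) (out : List (List (String × List Int))) : Prop := out = get_adjusted_rooms_data_alt conference_rooms_data desired_rooms_number
instance (conference_rooms_data : List (List (String × List Int))) (desired_rooms_number : Int) (out : List (List (String × List Int))) : Decidable (Spec_get_adjusted_rooms_data conference_rooms_data desired_rooms_number out) := by unfold Spec_get_adjusted_rooms_data; infer_instance

-- ===== CLAIM (what is proved, stated in full; the proofs are below) =====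
def Claim_equal_get_adjusted_rooms_data : Prop := ∀ (conference_rooms_data : List (List (String × List Int))) (desired_rooms_number : Int), Dom_get_adjusted_rooms_data conference_rooms_data desired_rooms_number → Pre_get_adjusted_rooms_data conference_rooms_data desired_rooms_number → Spec_get_adjusted_rooms_data conference_rooms_data desired_rooms_number (get_adjusted_rooms_data conference_rooms_data desired_rooms_number)

-- ===== LEMMAS AND PROOFS =====

-- descending index list [n-1, …, 0]
def pvDIdx : Nat → List Int
  | 0 => []
  | n + 1 => (n : Int) :: pvDIdx n

lemma pyRange_eq_pvDIdx (n : Nat) : PySem.List.pyRange ((n : Int) - 1) (-1) (-1) = pvDIdx n := by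
  induction n with
  | zero => simp [pvDIdx]
  | succ m ih =>
    rw [PySem.List.pyRange_neg_one_cons (by push_cast; omega)]
    simp only [pvDIdx]
    rw [show ((m + 1 : Nat) : Int) - 1 = (m : Int) by push_cast; ring, ih]

lemma mem_pvDIdx {i : Int} {n : Nat} (h : i ∈ pvDIdx n) : 0 ≤ i ∧ i < (n : Int) := by
  induction n with
  | zero => simp [pvDIdx] at h
  | succ m ih =>
    simp [pvDIdx] at h
    rcases h with h | h
    · omega
    · have := ih h; omega

-- A's loop rewritten with an explicit remaining-budget parameter
def pvGA (data : List (List (String × List Int))) : Int → List Int → List Int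
  | _, [] => []
  | b, i :: rest =>
    if b ≤ 0 then []
    else if (pvMeet ((PySem.List.pyGet? data i).getD [])).length = 0 then
      i :: pvGA data (b - 1) rest
    else pvGA data b rest

lemma pvALoop_eq_pvGA (data : List (List (String × List Int))) (d : Int) (idxs acc : List Int) :
    pvALoop data d idxs acc = acc ++ pvGA data ((data.length : Int) - d - (acc.length : Int)) idxs := by
  induction idxs generalizing acc with
  | nil => simp [pvALoop, pvGA]
  | cons i rest ih =>
    by_cases hb : (data.length : Int) - (acc.length : Int) ≤ d
    · have hb' : (data.length : Int) - d - (acc.length : Int) ≤ 0 := by omega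
      simp only [pvALoop, pvGA, if_pos hb, if_pos hb']
      simp
    · have hb' : ¬ ((data.length : Int) - d - (acc.length : Int) ≤ 0) := by omega
      by_cases he : (pvMeet ((PySem.List.pyGet? data i).getD [])).length = 0
      · simp only [pvALoop, pvGA, if_neg hb, if_neg hb', if_pos he]
        rw [ih]
        rw [List.append_assoc, List.singleton_append]
        congr 2
        simp
        ring
      · simp only [pvALoop, pvGA, if_neg hb, if_neg hb', if_neg he]
        exact ih acc

-- cons-building form of B's loop
def pvGB : Int → List (List (String × List Int)) → List (List (String × List Int))
  | _, [] => []
  | b, room :: rest =>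
    if 0 < b ∧ (pvMeet room).length = 0 then pvGB (b - 1) rest
    else room :: pvGB b rest

lemma pvBLoop_eq_pvGB (b : Int) (kept rooms : List (List (String × List Int))) :
    pvBLoop b kept rooms = kept ++ pvGB b rooms := by
  induction rooms generalizing b kept with
  | nil => simp [pvBLoop, pvGB]
  | cons r rest ih =>
    simp only [pvBLoop, pvGB]
    by_cases h : 0 < b ∧ (pvMeet r).length = 0
    · rw [if_pos h, if_pos h, ih]
    · rw [if_neg h, if_neg h, ih]; simp

lemma pvGB_nonpos (b : Int) (rooms : List (List (String × List Int))) (hb : b ≤ 0) :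
    pvGB b rooms = rooms := by
  induction rooms with
  | nil => rfl
  | cons r rest ih => simp [pvGB, ih]; intro h; omega

lemma mem_pvGA {data : List (List (String × List Int))} {b : Int} {idxs : List Int} {i : Int}
    (h : i ∈ pvGA data b idxs) : i ∈ idxs := by
  induction idxs generalizing b with
  | nil => simp [pvGA] at h
  | cons j rest ih =>
    simp only [pvGA] at h
    split_ifs at h with h1 h2
    · simp at h
    · simp at h ⊢
      rcases h with h | h
      · exact Or.inl h
      · exact Or.inr (ih h)
    · exact List.mem_cons_of_mem _ (ih h)

-- on indices < |ys| the data (ys ++ [r]) reads like ys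
lemma pvGA_append {ys : List (List (String × List Int))} (r : List (String × List Int))
    (b : Int) (idxs : List Int) (h : ∀ i ∈ idxs, 0 ≤ i ∧ i < (ys.length : Int)) :
    pvGA (ys ++ [r]) b idxs = pvGA ys b idxs := by
  induction idxs generalizing b with
  | nil => rfl
  | cons i rest ih =>
    have hi := h i (List.mem_cons_self ..)
    have hrest : ∀ j ∈ rest, 0 ≤ j ∧ j < (ys.length : Int) := fun j hj => h j (List.mem_cons_of_mem _ hj)
    have hget : PySem.List.pyGet? (ys ++ [r]) i = PySem.List.pyGet? ys i := by
      rw [PySem.List.pyGet?_of_nonneg _ hi.1, PySem.List.pyGet?_of_nonneg _ hi.1]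
      rw [List.getElem?_append_left (by omega)]
    simp only [pvGA, hget]
    split_ifs with h1 h2
    · rfl
    · rw [ih _ hrest]
    · rw [ih _ hrest]

-- the key equivalence, by snoc induction on the room list
lemma pvKey (xs : List (List (String × List Int))) : ∀ b : Int,
    ((PySem.List.enumerate xs 0).filter
        (fun p => !((pvGA xs b (pvDIdx xs.length)).contains p.1))).map (·.2)
      = (pvGB b xs.reverse).reverse := by
  induction xs using List.reverseRecOn with
  | nil => intro b; simp [PySem.List.enumerate, pvGA, pvGB, pvDIdx]
  | append_singleton ys r ih =>
    intro b
    have hlen : (ys ++ [r]).length = ys.length + 1 := by simp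
    have hdidx : pvDIdx (ys ++ [r]).length = (ys.length : Int) :: pvDIdx ys.length := by
      rw [hlen]; rfl
    have henum : PySem.List.enumerate (ys ++ [r]) 0
        = PySem.List.enumerate ys 0 ++ [((ys.length : Int), r)] := by
      rw [PySem.List.enumerate_append]
      simp [PySem.List.enumerate]
    have hmeml : ∀ i ∈ pvDIdx ys.length, 0 ≤ i ∧ i < (ys.length : Int) := fun i hi => mem_pvDIdx hi
    have hgetlast : PySem.List.pyGet? (ys ++ [r]) (ys.length : Int) = some r :=
      PySem.List.pyGet?_append_length ..
    have hfst : ∀ p ∈ PySem.List.enumerate ys 0, p.1 < (ys.length : Int) := by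
      intro p hp
      rcases (PySem.List.mem_enumerate_iff _ _ _).1 hp with ⟨k, hk, rfl⟩
      simpa using hk
    by_cases hb : b ≤ 0
    · -- budget exhausted: nothing removed, nothing skipped
      have hR : pvGA (ys ++ [r]) b (pvDIdx (ys ++ [r]).length) = [] := by
        rw [hdidx]; simp only [pvGA]; rw [if_pos hb]
      rw [hR, pvGB_nonpos _ _ hb]
      simp [PySem.List.map_snd_enumerate]
    · rw [hdidx]
      simp only [pvGA]
      rw [if_neg hb, List.reverse_append]
      simp only [List.reverse_singleton, List.singleton_append, pvGB, hgetlast, Option.getD_some]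
      by_cases he : (pvMeet r).length = 0
      · -- r is empty and budget remains: both drop r
        rw [if_pos he, if_pos ⟨by omega, he⟩]
        set R' := pvGA (ys ++ [r]) (b - 1) (pvDIdx ys.length) with hR'
        have hR'ys : R' = pvGA ys (b - 1) (pvDIdx ys.length) := pvGA_append r _ _ hmeml
        rw [henum, List.filter_append]
        have hlast : List.filter (fun p => !((((ys.length : Int)) :: R').contains p.1))
            [((ys.length : Int), r)] = [] := by simp
        rw [hlast, List.append_nil]
        have hcongr : List.filter (fun p => !((((ys.length : Int)) :: R').contains p.1))
            (PySem.List.enumerate ys 0)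
            = List.filter (fun p => !(R'.contains p.1)) (PySem.List.enumerate ys 0) := by
          apply List.filter_congr
          intro p hp
          have hne : p.1 ≠ ((ys.length : Int)) := by have := hfst p hp; omega
          simp [hne]
        rw [hcongr, hR'ys, ih (b - 1)]
      · -- r is kept by both
        rw [if_neg he, if_neg (by tauto)]
        set R' := pvGA (ys ++ [r]) b (pvDIdx ys.length) with hR'
        have hR'ys : R' = pvGA ys b (pvDIdx ys.length) := pvGA_append r _ _ hmeml
        have hnot : ((ys.length : Int)) ∉ R' := fun hmem => by
          have := mem_pvDIdx (mem_pvGA hmem)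
          omega
        rw [henum, List.filter_append]
        have hlast : List.filter (fun p => !(R'.contains p.1)) [((ys.length : Int), r)]
            = [((ys.length : Int), r)] := by simp [hnot]
        rw [hlast, List.map_append, hR'ys, ih b]
        simp

-- ===== VERDICT (by name: the statement is the Claim_ definition above) =====
theorem get_adjusted_rooms_data_spec : Claim_equal_get_adjusted_rooms_data := by
  intro data d _ _
  unfold Spec_get_adjusted_rooms_data get_adjusted_rooms_data get_adjusted_rooms_data_alt
  rw [pvALoop_eq_pvGA, pvBLoop_eq_pvGB, pyRange_eq_pvDIdx]
  simp only [List.nil_append, List.length_nil, Nat.cast_zero, sub_zero]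
  rw [pvKey data ((data.length : Int) - d)]
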